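-- pv_equiv track=rewrite | github.com/jewettaij/moltemplate | moltemplate/postprocess_transitions.py | ExtractVarName
-- ===== SOURCE A (Python) =====
-- def ExtractVarName(text):
--     """ Read a string like 'atom:A  '  or  '{/atom:A B/C/../D }ABC '
--         and return ('','atom:A','  ')  or  ('{','atom:A B/C/../D ','}ABC')
--         These are 3-tuples containing the portion of the text containing
--         only the variable's name (assumed to be within the text),
--         ...in addition to the text on either side of the variable name.
--     """
--     i_begin = 0
--     escape = '\''
--     lparen = '{'
--     rparen = '}'
--     escaped = False
--     commenters = '#'
--     whitespace = ' \t\r\f\n'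
--     terminators = whitespace + commenters
--     # Ideally, perhaps I should lookup these values from ttree_lex.TtreeLex to
--     # make sure I am being consistent, instead of re-defining them in this file.
--     #while ((i_begin < len(text)) and
--     #       (text[i_begin] in whitespace)):
--     #    i_begin += 1
--     in_paren = text[i_begin:i_begin+1] == lparen
--     if in_paren:
--         terminators = rparen
--         i_begin += 1
--     i_end = i_begin
--     while ((i_end < len(text)) and
--            (text[i_end] not in terminators)):
--         i_end += 1
--     return (text[0: i_begin],
--             text[i_begin:i_end],
--             text[i_end:])
-- ===== SOURCE B (Python) =====
-- def ExtractVarName(text):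
--     if text[:1] == '{':
--         prefix, start, terms = '{', 1, '}'
--     else:
--         prefix, start, terms = '', 0, ' \t\r\f\n#'
--     rest = text[start:]
--     positions = [p for p in (rest.find(c) for c in terms) if p != -1]
--     end = min(positions) if positions else len(rest)
--     return (prefix, rest[:end], rest[end:])
-- ===== Notes on version B (the rewrite author's own statement) =====
-- stated objective: faster
-- what changed: A scans character by character with a Python while loop stopping at the first terminator; B instead runs str.find once per terminator character over the remaining substring and takes the minimum of the hits (defaulting to the substring length), then slices.
import Mathlib
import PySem

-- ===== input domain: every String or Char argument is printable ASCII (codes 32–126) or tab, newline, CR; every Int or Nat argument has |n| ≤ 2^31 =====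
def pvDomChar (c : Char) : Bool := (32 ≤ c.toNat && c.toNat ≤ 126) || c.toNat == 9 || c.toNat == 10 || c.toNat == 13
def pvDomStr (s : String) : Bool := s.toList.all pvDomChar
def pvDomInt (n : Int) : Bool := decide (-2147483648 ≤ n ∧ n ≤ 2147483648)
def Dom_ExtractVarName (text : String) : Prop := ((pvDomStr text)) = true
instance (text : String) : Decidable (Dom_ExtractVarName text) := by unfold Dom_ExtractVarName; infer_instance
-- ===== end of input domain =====

-- B replaces A's character-by-character stop-at-first-terminator while-loop by a per-terminator
-- str.find + minimum computation (objective: alternative; same behaviour, a differently shaped pass).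

-- ===== PORT A =====
-- the while-loop 'while i_end < len(text) and text[i_end] not in terminators: i_end += 1',
-- as structural recursion counting the chars before the first terminator
def pvScanA (terms : List Char) : List Char → Nat
  | [] => 0
  | c :: cs => if c ∈ terms then 0 else pvScanA terms cs + 1

def ExtractVarName (text : String) : String × String × String :=
  let cs := text.toList
  -- in_paren = text[i_begin:i_begin+1] == lparen
  let inParen := cs.take 1 = ['{']
  -- terminators = '}' if in_paren else whitespace + commenters; i_begin += 1 if in_paren
  let terms := if inParen then ['}'] else [' ', '\t', '\r', Char.ofNat 12, '\n', '#']
  let iBegin := if inParen then 1 else 0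
  let rest := cs.drop iBegin                       -- text[i_begin:]
  let n := pvScanA terms rest                      -- i_end - i_begin after the while loop
  (String.ofList (cs.take iBegin),                     -- text[0:i_begin]
   String.ofList (rest.take n),                        -- text[i_begin:i_end]
   String.ofList (rest.drop n))                        -- text[i_end:]

-- ===== PORT B =====
def ExtractVarName_alt (text : String) : String × String × String :=
  let cs := text.toList
  let (pre, start, terms) :=
    if cs.take 1 = ['{'] then ("{", 1, ['}'])
    else ("", 0, [' ', '\t', '\r', Char.ofNat 12, '\n', '#'])
  let rest := cs.drop start
  -- positions = [p for p in (rest.find(c) for c in terms) if p != -1]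
  let positions := terms.filterMap (fun c => rest.idxOf? c)
  -- end = min(positions) if positions else len(rest)
  let e := positions.min?.getD rest.length
  (pre, String.ofList (rest.take e), String.ofList (rest.drop e))

-- ===== PRECONDITION & SPEC =====
def Spec_ExtractVarName (text : String) (out : String × String × String) : Prop := out = ExtractVarName_alt text
instance (text : String) (out : String × String × String) : Decidable (Spec_ExtractVarName text out) := by unfold Spec_ExtractVarName; infer_instance

-- ===== CLAIM (what is proved, stated in full; the proofs are below) =====
def Claim_equal_ExtractVarName : Prop := ∀ (text : String), Dom_ExtractVarName text → Spec_ExtractVarName text (ExtractVarName text)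

-- ===== LEMMAS AND PROOFS =====

theorem pv_filterMap_idxOf?_cons {a : Char} {terms cs : List Char} (h : a ∉ terms) :
    terms.filterMap (fun t => (a :: cs).idxOf? t)
      = (terms.filterMap (fun t => cs.idxOf? t)).map (· + 1) := by
  induction terms with
  | nil => simp
  | cons t ts ih =>
    have hne : a ≠ t := fun hEq => h (hEq ▸ List.mem_cons_self ..)
    have hmem : a ∉ ts := fun hm => h (List.mem_cons_of_mem _ hm)
    have hhead : (a :: cs).idxOf? t = (cs.idxOf? t).map (· + 1) := by
      simp [List.idxOf?_cons, hne]
    rw [List.filterMap_cons, List.filterMap_cons, hhead, ih hmem]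
    cases cs.idxOf? t <;> simp

theorem pv_min?_map_succ (l : List Nat) :
    (l.map (· + 1)).min? = l.min?.map (· + 1) := by
  induction l with
  | nil => rfl
  | cons a bs ih =>
    rw [List.map_cons, List.min?_cons, List.min?_cons, ih]
    cases bs.min? <;> simp [Nat.add_min_add_right]

theorem pv_min?_getD_zero_of_mem {l : List Nat} (h : 0 ∈ l) (d : Nat) :
    l.min?.getD d = 0 := by
  induction l with
  | nil => cases h
  | cons a bs ih =>
    rw [List.min?_cons]
    rcases List.mem_cons.mp h with h0 | h0
    · subst h0
      cases hb : bs.min? <;> simp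
    · have := ih h0
      cases hb : bs.min? with
      | none =>
        have hnil : bs = [] := List.min?_eq_none_iff.mp hb
        subst hnil; cases h0
      | some m =>
        rw [hb] at this
        simp only [Option.getD_some] at this
        subst this
        simp

theorem pv_scan_eq_min (terms cs : List Char) :
    pvScanA terms cs = ((terms.filterMap (fun t => cs.idxOf? t)).min?.getD cs.length) := by
  induction cs with
  | nil => simp [pvScanA, List.idxOf?]
  | cons a cs ih =>
    by_cases h : a ∈ terms
    · have hz : (0 : Nat) ∈ terms.filterMap (fun t => (a :: cs).idxOf? t) := by
        refine List.mem_filterMap.mpr ⟨a, h, ?_⟩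
        simp [List.idxOf?_cons]
      simp [pvScanA, h, pv_min?_getD_zero_of_mem hz]
    · rw [pv_filterMap_idxOf?_cons h]
      simp only [pvScanA, h, if_false, pv_min?_map_succ, ih, List.length_cons]
      cases (terms.filterMap (fun t => cs.idxOf? t)).min? <;> simp

-- ===== VERDICT (by name: the statement is the Claim_ definition above) =====
theorem ExtractVarName_spec : Claim_equal_ExtractVarName := by
  intro text _
  unfold Spec_ExtractVarName ExtractVarName ExtractVarName_alt
  by_cases h : text.toList.take 1 = ['{']
  · simp only [h, if_pos, pv_scan_eq_min]
  · simp only [h, reduceIte, pv_scan_eq_min, List.take_zero, List.drop_zero]
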